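-- pv_equiv track=rewrite | github.com/lugezz/repo_testing | excercises/balls_in_bucket.py | min_moves_to_place_balls
-- ===== SOURCE A (Python) =====
-- def min_moves_to_place_balls(buckets: str) -> int:
--     # Get all positions of the balls "B"
--     ball_positions = [i for i, ch in enumerate(buckets) if ch == "B"]
--     n = len(ball_positions)
--
--     if n <= 1:
--         return 0  # No moves needed if there is 1 or no ball
--
--     # Initialize move counter
--     moves = 0
--
--     # We will try to form clusters with one move
--     i = 0
--     while i < n - 1:
--         # Check if the next ball is more than 2 spaces away (i.e., needs to be moved)
--         if ball_positions[i+1] - ball_positions[i] > 2: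
--             # Move the farthest ball to the nearest correct position
--             new_position = ball_positions[i] + 2
--             ball_positions[i+1] = new_position  # This simulates moving the ball
--             moves += 1  # Increment the move counter
--         i += 1
--
--     return moves
-- ===== SOURCE B (Python) =====
-- def min_moves_to_place_balls(buckets: str) -> int:
--     # Closed form: with d_k = position_k - 2*k, the answer equals the number of
--     # elements of (d_k) that are strictly greater than the minimum of all earlier
--     # d's (non prefix-minimum "records").  No simulation of moves is performed.
--     positions = [i for i, ch in enumerate(buckets) if ch == "B"]
--     ds = [p - 2 * k for k, p in enumerate(positions)]
--     moves = 0
--     m = None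
--     for d in ds:
--         if m is None or d <= m:
--             m = d
--         else:
--             moves += 1
--     return moves
-- ===== Notes on version B (the rewrite author's own statement) =====
-- stated objective: alternative
-- what changed: B does not simulate moves at all: it maps each ball position p_k to d_k = p_k - 2k and returns the number of d's strictly above the running minimum of the earlier d's (counting non prefix-minima), instead of A's greedy in-place mutation of the position list.
import Mathlib
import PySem

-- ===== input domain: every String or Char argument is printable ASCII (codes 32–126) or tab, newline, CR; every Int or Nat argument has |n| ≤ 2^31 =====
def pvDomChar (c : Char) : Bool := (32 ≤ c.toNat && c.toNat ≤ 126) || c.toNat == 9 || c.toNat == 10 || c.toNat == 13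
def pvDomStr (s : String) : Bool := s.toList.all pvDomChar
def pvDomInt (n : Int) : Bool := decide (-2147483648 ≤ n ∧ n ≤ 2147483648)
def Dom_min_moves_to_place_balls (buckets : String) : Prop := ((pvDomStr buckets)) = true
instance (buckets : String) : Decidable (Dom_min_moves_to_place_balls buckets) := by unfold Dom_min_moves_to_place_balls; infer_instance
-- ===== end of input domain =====

-- B replaces A's greedy move simulation on a mutated position list by a closed form:
-- map ball positions to d_k = p_k - 2k and count the d's strictly above the running
-- minimum of earlier d's (alternative algorithm, same O(n) cost).


-- ===== PORT A =====
-- A's while-loop: i runs while i < len(lst) - 1; indices i, i+1 are always in range there,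
-- so Python's lst[i] is ported as getD (the default is never read).
def pvALoop (lst : List Int) (i : Nat) (moves : Int) : Int :=
  if _h : i < lst.length - 1 then
    if lst.getD (i+1) 0 - lst.getD i 0 > 2 then
      pvALoop (lst.set (i+1) (lst.getD i 0 + 2)) (i+1) (moves+1)
    else
      pvALoop lst (i+1) moves
  else moves
termination_by lst.length - i
decreasing_by all_goals simp_all; omega

def min_moves_to_place_balls (buckets : String) : Int :=
  let ball_positions := (PySem.List.enumerate buckets.toList).filterMap
    (fun p => if p.2 = 'B' then some p.1 else none)
  let n := ball_positions.length
  if n ≤ 1 then 0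
  else pvALoop ball_positions 0 0

-- ===== PORT B =====
-- the body of Source B's for-loop over ds, state (m : Option Int = running min, moves)
def pvBStep (st : Option Int × Int) (d : Int) : Option Int × Int :=
  match st.1 with
  | none => (some d, st.2)
  | some m => if d ≤ m then (some d, st.2) else (some m, st.2 + 1)

def min_moves_to_place_balls_alt (buckets : String) : Int :=
  let positions := (PySem.List.enumerate buckets.toList).filterMap
    (fun p => if p.2 = 'B' then some p.1 else none)
  let ds := (PySem.List.enumerate positions).map (fun q => q.2 - 2 * q.1)
  (ds.foldl pvBStep (none, 0)).2

-- ===== PRECONDITION & SPEC =====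
def Spec_min_moves_to_place_balls (buckets : String) (out : Int) : Prop := out = min_moves_to_place_balls_alt buckets
instance (buckets : String) (out : Int) : Decidable (Spec_min_moves_to_place_balls buckets out) := by unfold Spec_min_moves_to_place_balls; infer_instance

-- ===== CLAIM =====
def Claim_equal_min_moves_to_place_balls : Prop := ∀ (buckets : String), Dom_min_moves_to_place_balls buckets → Spec_min_moves_to_place_balls buckets (min_moves_to_place_balls buckets)

-- ===== LEMMAS AND PROOFS =====

-- A's step on the bare position list: effective last position e, move counter
def pvStep (st : Int × Int) (q : Int) : Int × Int :=
  if q - st.1 > 2 then (st.1 + 2, st.2 + 1) else (q, st.2)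

theorem pvALoop_eq_foldl (rest : List Int) : ∀ (pre : List Int) (p moves : Int),
    pvALoop (pre ++ p :: rest) pre.length moves = (rest.foldl pvStep (p, moves)).2 := by
  induction rest with
  | nil =>
    intro pre p moves
    rw [pvALoop]
    simp
  | cons q rest ih =>
    intro pre p moves
    rw [pvALoop]
    have hlen : (pre ++ p :: q :: rest).length = pre.length + 2 + rest.length := by
      simp; omega
    have h1 : pre.length < (pre ++ p :: q :: rest).length - 1 := by omega
    have hp : (pre ++ p :: q :: rest).getD pre.length 0 = p := by
      simp [List.getD]
    have hq : (pre ++ p :: q :: rest).getD (pre.length + 1) 0 = q := by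
      simp [List.getD]
    simp only [h1, dif_pos, hp, hq]
    by_cases hc : q - p > 2
    · have hset : (pre ++ p :: q :: rest).set (pre.length + 1) (p + 2)
          = (pre ++ [p]) ++ (p + 2) :: rest := by
        rw [show pre.length + 1 = pre.length + 1 from rfl,
            List.set_append_right _ _ (by omega)]
        simp
      have hlen' : pre.length + 1 = (pre ++ [p]).length := by simp
      rw [if_pos hc, hset, hlen', ih]
      simp [pvStep, hc, List.foldl_cons]
    · have hlen' : pre.length + 1 = (pre ++ [p]).length := by simp
      have hsplit : pre ++ p :: q :: rest = (pre ++ [p]) ++ q :: rest := by simp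
      rw [if_neg hc, hsplit, hlen', ih]
      simp [pvStep, hc, List.foldl_cons]

-- Invariant tying B's running minimum m of the d's to A's effective last position e:
-- m = e - 2k where k is the index of the last processed position.
theorem pvBfold_some (rest : List Int) : ∀ (k e m mv : Int), m = e - 2 * k →
    (((PySem.List.enumerate rest (k+1)).map (fun q => q.2 - 2 * q.1)).foldl
        pvBStep (some m, mv)).2
      = (rest.foldl pvStep (e, mv)).2 := by
  induction rest with
  | nil => intro k e m mv _; simp
  | cons q rest ih =>
    intro k e m mv hm
    rw [PySem.List.enumerate_cons]
    simp only [List.map_cons, List.foldl_cons, pvBStep, pvStep]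
    by_cases hc : q - e > 2
    · have hd : ¬ (q - 2 * (k + 1) ≤ m) := by omega
      simp only [hd, if_neg, not_false_iff, if_pos hc]
      exact ih (k+1) (e+2) m (mv+1) (by omega)
    · have hd : q - 2 * (k + 1) ≤ m := by omega
      simp only [hd, if_pos, if_neg hc]
      exact ih (k+1) q (q - 2 * (k+1)) mv (by ring)

-- ===== VERDICT =====
theorem min_moves_to_place_balls_spec : Claim_equal_min_moves_to_place_balls := by
  intro buckets _
  unfold Spec_min_moves_to_place_balls min_moves_to_place_balls min_moves_to_place_balls_alt
  cases hps : (PySem.List.enumerate buckets.toList).filterMap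
      (fun p => if p.2 = 'B' then some p.1 else none) with
  | nil => simp
  | cons p rest =>
    cases rest with
    | nil => simp [PySem.List.enumerate, pvBStep]
    | cons q rest' =>
      have hB : (((PySem.List.enumerate (p :: q :: rest')).map
            (fun q => q.2 - 2 * q.1)).foldl pvBStep (none, 0)).2
          = ((q :: rest').foldl pvStep (p, 0)).2 := by
        rw [PySem.List.enumerate_cons]
        simp only [List.map_cons, List.foldl_cons, pvBStep]
        have := pvBfold_some (q :: rest') 0 p (p - 2 * 0) 0 (by ring)
        simpa using this
      have hA := pvALoop_eq_foldl (q :: rest') [] p 0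
      simp only [List.nil_append, List.length_nil] at hA
      simp only [List.length_cons, hB]
      rw [if_neg (by omega)]
      exact hA
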